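-- pv_equiv track=rewrite | github.com/tahmid-tanzim/problem-solving | Arrays_and_Strings/Non-Constructible-Change.py | nonConstructibleChange1
-- ===== SOURCE A (Python) =====
-- def nonConstructibleChange1(coins):
--     n = len(coins)
--     coins.sort()
--     amount = 1
--     while True:
--         total_value = amount
--         for idx in range(n - 1, -1, -1):
--             if total_value == 0:
--                 break
--             if coins[idx] <= total_value:
--                 total_value -= coins[idx]
--         if total_value > 0:
--             return amount
--         amount += 1
-- ===== SOURCE B (Python) =====
-- def nonConstructibleChange1(coins):
--     # Classic O(n log n) solution: after sorting, keep the running total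
--     # 'change' of constructible amounts 1..change; a coin > change+1 leaves
--     # change+1 non-constructible. Negative coins cannot help make change.
--     coins.sort()
--     change = 0
--     for coin in coins:
--         if coin < 0:
--             continue
--         if coin > change + 1:
--             break
--         change += coin
--     return change + 1
-- ===== Notes on version B (the rewrite author's own statement) =====
-- stated objective: faster
-- what changed: Replaces the per-amount descending greedy re-check (an unbounded while loop running one greedy pass for every candidate amount) with the classic single sorted scan that tracks the running constructible range and returns change+1 at the first gap.
import Mathlib
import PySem

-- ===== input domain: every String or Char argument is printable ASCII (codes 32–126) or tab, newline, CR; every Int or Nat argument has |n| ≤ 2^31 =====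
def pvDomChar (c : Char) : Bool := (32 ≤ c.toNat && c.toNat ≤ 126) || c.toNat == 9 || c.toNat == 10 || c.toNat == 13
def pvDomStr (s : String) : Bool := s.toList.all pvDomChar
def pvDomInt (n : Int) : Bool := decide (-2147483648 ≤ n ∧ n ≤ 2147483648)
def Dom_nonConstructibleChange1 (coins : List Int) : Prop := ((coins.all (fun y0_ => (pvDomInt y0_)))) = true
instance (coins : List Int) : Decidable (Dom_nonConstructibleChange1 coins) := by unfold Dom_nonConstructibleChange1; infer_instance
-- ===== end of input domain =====

-- B replaces A's per-amount greedy re-check with the classic single sorted scan (change+1 at the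
-- first gap), measurably faster; both Pythons sort the argument in place (the equivalence proved
-- is about the return value).


-- ===== PORT A =====
-- inner 'for idx in range(n-1,-1,-1)' over the sorted list = structural recursion over its reverse
def pvGreedy : List Int → Int → Int
  | [], t => t
  | c :: rest, t => if t = 0 then t else pvGreedy rest (if c ≤ t then t - c else t)

-- the 'while True' loop; fuel only makes the loop a Lean term (sum of the positive coins + 1
-- iterations always suffice: the greedy residue at that amount is positive, see greedy_lb below)
def pvAmountLoop (rev : List Int) : Nat → Int → Int
  | 0, amount => amount
  | fuel + 1, amount =>
      if 0 < pvGreedy rev amount then amount else pvAmountLoop rev fuel (amount + 1)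

def nonConstructibleChange1 (coins : List Int) : Int :=
  let s := PySem.List.sorted coins (fun x => x) false
  pvAmountLoop s.reverse ((coins.map (fun c => max c 0)).sum.toNat + 1) 1

-- ===== PORT B =====
def pvChangeLoop : List Int → Int → Int
  | [], change => change + 1
  | c :: rest, change =>
      if c < 0 then pvChangeLoop rest change
      else if c > change + 1 then change + 1
      else pvChangeLoop rest (change + c)

def nonConstructibleChange1_alt (coins : List Int) : Int :=
  pvChangeLoop (PySem.List.sorted coins (fun x => x) false) 0

-- ===== PRECONDITION & SPEC =====
def Spec_nonConstructibleChange1 (coins : List Int) (out : Int) : Prop := out = nonConstructibleChange1_alt coins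
instance (coins : List Int) (out : Int) : Decidable (Spec_nonConstructibleChange1 coins out) := by unfold Spec_nonConstructibleChange1; infer_instance

-- ===== CLAIM (what is proved, stated in full; the proofs are below) =====
def Claim_equal_nonConstructibleChange1 : Prop := ∀ (coins : List Int), Dom_nonConstructibleChange1 coins → Spec_nonConstructibleChange1 coins (nonConstructibleChange1 coins)

-- ===== LEMMAS AND PROOFS =====

-- 'u is complete above base c': each element ≤ (running total) + 1, so every amount up to the total is greedily reachable
def pvComp : Int → List Int → Prop
  | _, [] => True
  | c, x :: xs => x ≤ c + 1 ∧ pvComp (c + x) xs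

lemma greedy_zero (l : List Int) : pvGreedy l 0 = 0 := by
  cases l <;> simp [pvGreedy]

lemma greedy_neg_ge (e : List Int) : ∀ t, (∀ x ∈ e, x < 0) → 0 < t → t ≤ pvGreedy e t := by
  induction e with
  | nil => intro t _ _; simp [pvGreedy]
  | cons c rest ih =>
    intro t hneg ht
    have hc : c < 0 := hneg c (by simp)
    have : pvGreedy (c :: rest) t = pvGreedy rest (t - c) := by
      simp only [pvGreedy, if_neg (by omega : ¬ t = 0), if_pos (by omega : c ≤ t)]
    rw [this]
    have := ih (t - c) (fun x hx => hneg x (by simp [hx])) (by omega)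
    omega

lemma greedy_append_neg (d : List Int) : ∀ (e : List Int) (t : Int), (∀ x ∈ d, 0 ≤ x) →
    (∀ x ∈ e, x < 0) → 0 ≤ t → (0 < pvGreedy (d ++ e) t ↔ 0 < pvGreedy d t) := by
  induction d with
  | nil =>
    intro e t _ hneg ht
    simp only [List.nil_append, pvGreedy]
    rcases lt_or_eq_of_le ht with h | h
    · constructor
      · intro _; exact h
      · intro _; have := greedy_neg_ge e t hneg h; omega
    · rw [← h, greedy_zero]
  | cons c rest ih =>
    intro e t hd hneg ht
    by_cases h0 : t = 0
    · subst h0; rw [List.cons_append]; simp [pvGreedy]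
    · have hc : 0 ≤ c := hd c (by simp)
      rw [List.cons_append]
      simp only [pvGreedy, if_neg h0]
      by_cases hct : c ≤ t
      · simp only [if_pos hct]
        exact ih e (t - c) (fun x hx => hd x (by simp [hx])) hneg (by omega)
      · simp only [if_neg hct]
        exact ih e t (fun x hx => hd x (by simp [hx])) hneg ht

lemma greedy_skip (l1 : List Int) : ∀ (l2 : List Int) (t : Int), 0 ≤ t →
    (∀ x ∈ l1, t < x) → pvGreedy (l1 ++ l2) t = pvGreedy l2 t := by
  induction l1 with
  | nil => intro l2 t _ _; rfl
  | cons c rest ih =>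
    intro l2 t ht hgt
    by_cases h0 : t = 0
    · subst h0; rw [List.cons_append]
      simp [pvGreedy, greedy_zero]
    · rw [List.cons_append]
      have hct : ¬ c ≤ t := by have := hgt c (by simp); omega
      simp only [pvGreedy, if_neg h0, if_neg hct]
      exact ih l2 t ht (fun x hx => hgt x (by simp [hx]))

lemma greedy_lb (l : List Int) : ∀ t, (∀ x ∈ l, 0 ≤ x) → t - l.sum ≤ pvGreedy l t := by
  induction l with
  | nil => intro t _; simp [pvGreedy]
  | cons c rest ih =>
    intro t hl
    have hrest : ∀ x ∈ rest, 0 ≤ x := fun x hx => hl x (by simp [hx])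
    have hsum : 0 ≤ rest.sum := List.sum_nonneg hrest
    have hc : 0 ≤ c := hl c (by simp)
    by_cases h0 : t = 0
    · subst h0; simp [pvGreedy, List.sum_cons]; omega
    · simp only [pvGreedy, if_neg h0, List.sum_cons]
      by_cases hct : c ≤ t
      · simp only [if_pos hct]
        have := ih (t - c) hrest; omega
      · simp only [if_neg hct]
        have := ih t hrest; omega

lemma comp_snoc (p : List Int) : ∀ (c x : Int), pvComp c (p ++ [x]) ↔ pvComp c p ∧ x ≤ c + p.sum + 1 := by
  induction p with
  | nil => intro c x; simp [pvComp]
  | cons y rest ih =>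
    intro c x
    simp only [List.cons_append, pvComp, List.sum_cons, ih (c + y) x]
    constructor
    · rintro ⟨h1, h2, h3⟩; exact ⟨⟨h1, h2⟩, by omega⟩
    · rintro ⟨⟨h1, h2⟩, h3⟩; exact ⟨h1, h2, by omega⟩

lemma greedy_success (p : List Int) : ∀ m, pvComp 0 p → (∀ x ∈ p, 0 ≤ x) → 0 ≤ m → m ≤ p.sum →
    pvGreedy p.reverse m = 0 := by
  induction p using List.reverseRecOn with
  | nil =>
    intro m _ _ h1 h2
    simp only [List.sum_nil] at h2
    have : m = 0 := le_antisymm h2 h1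
    simp [this, pvGreedy]
  | append_singleton q x ih =>
    intro m hcomp hnn hm0 hms
    obtain ⟨hcq, hx⟩ := (comp_snoc q 0 x).mp hcomp
    rw [zero_add] at hx
    have hqnn : ∀ y ∈ q, 0 ≤ y := fun y hy => hnn y (by simp [hy])
    have hxnn : 0 ≤ x := hnn x (by simp)
    rw [List.sum_append, List.sum_cons, List.sum_nil] at hms
    rw [List.reverse_append, List.reverse_singleton, List.singleton_append]
    by_cases h0 : m = 0
    · simp [h0, pvGreedy]
    · simp only [pvGreedy, if_neg h0]
      by_cases hxm : x ≤ m
      · simp only [if_pos hxm]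
        exact ih (m - x) hcq hqnn (by omega) (by omega)
      · simp only [if_neg hxm]
        exact ih m hcq hqnn hm0 (by omega)

lemma greedy_fail (p : List Int) (hnn : ∀ x ∈ p, 0 ≤ x) : 0 < pvGreedy p.reverse (p.sum + 1) := by
  have := greedy_lb p.reverse (p.sum + 1) (fun x hx => hnn x (List.mem_reverse.mp hx))
  rw [List.sum_reverse] at this
  omega

lemma amountLoop_eq (rev : List Int) (B : Int)
    (hsucc : ∀ k, 1 ≤ k → k < B → ¬ (0 < pvGreedy rev k))
    (hfail : 0 < pvGreedy rev B) :
    ∀ (fuel : Nat) (m : Int), 1 ≤ m → m ≤ B → (B - m).toNat < fuel →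
      pvAmountLoop rev fuel m = B := by
  intro fuel
  induction fuel with
  | zero => intro m _ _ h; omega
  | succ n ih =>
    intro m h1 h2 h3
    simp only [pvAmountLoop]
    by_cases hm : m = B
    · subst hm; rw [if_pos hfail]
    · have hlt : m < B := lt_of_le_of_ne h2 hm
      rw [if_neg (hsucc m h1 hlt)]
      exact ih (m + 1) (by omega) (by omega) (by omega)

lemma sorted_split (s : List Int) (h : s.Pairwise (· ≤ ·)) :
    ∃ neg p, s = neg ++ p ∧ (∀ x ∈ neg, x < 0) ∧ (∀ x ∈ p, 0 ≤ x) := by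
  induction s with
  | nil => exact ⟨[], [], rfl, by simp, by simp⟩
  | cons x t ih =>
    have ht : t.Pairwise (· ≤ ·) := (List.pairwise_cons.mp h).2
    have hhd : ∀ y ∈ t, x ≤ y := (List.pairwise_cons.mp h).1
    by_cases hx : x < 0
    · obtain ⟨neg, p, he, hn, hp⟩ := ih ht
      exact ⟨x :: neg, p, by rw [he, List.cons_append], by
        intro y hy; rcases List.mem_cons.mp hy with h | h
        · exact h ▸ hx
        · exact hn y h, hp⟩
    · exact ⟨[], x :: t, rfl, by simp, by
        intro y hy; rcases List.mem_cons.mp hy with h | h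
        · omega
        · have := hhd y h; omega⟩

lemma changeLoop_skip (neg : List Int) : ∀ (p : List Int) (c : Int), (∀ x ∈ neg, x < 0) →
    pvChangeLoop (neg ++ p) c = pvChangeLoop p c := by
  induction neg with
  | nil => intro p c _; rfl
  | cons y rest ih =>
    intro p c hn
    rw [List.cons_append]
    simp only [pvChangeLoop, if_pos (hn y (by simp))]
    exact ih p c (fun x hx => hn x (by simp [hx]))

lemma changeLoop_spec (p : List Int) : ∀ c : Int, (∀ x ∈ p, 0 ≤ x) → p.Pairwise (· ≤ ·) →
    ∃ u v, p = u ++ v ∧ pvChangeLoop p c = c + u.sum + 1 ∧ pvComp c u ∧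
      ∀ x ∈ v, c + u.sum + 1 < x := by
  induction p with
  | nil => intro c _ _; exact ⟨[], [], rfl, by simp [pvChangeLoop], trivial, by simp⟩
  | cons x rest ih =>
    intro c hnn hpw
    have hx0 : 0 ≤ x := hnn x (by simp)
    have hrestnn : ∀ y ∈ rest, 0 ≤ y := fun y hy => hnn y (by simp [hy])
    have hrestpw : rest.Pairwise (· ≤ ·) := (List.pairwise_cons.mp hpw).2
    have hhd : ∀ y ∈ rest, x ≤ y := (List.pairwise_cons.mp hpw).1
    by_cases hbig : x > c + 1
    · refine ⟨[], x :: rest, rfl, ?_, trivial, ?_⟩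
      · simp only [pvChangeLoop, if_neg (by omega : ¬ x < 0), if_pos hbig, List.sum_nil]
        ring
      · intro y hy
        rcases List.mem_cons.mp hy with h | h
        · simp only [List.sum_nil]; omega
        · have := hhd y h; simp only [List.sum_nil]; omega
    · obtain ⟨u', v', he, hval, hcomp, hv⟩ := ih (c + x) hrestnn hrestpw
      refine ⟨x :: u', v', by rw [he, List.cons_append], ?_, ⟨by omega, hcomp⟩, ?_⟩
      · simp only [pvChangeLoop, if_neg (by omega : ¬ x < 0), if_neg hbig, hval,
          List.sum_cons]
        ring
      · intro y hy
        have := hv y hy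
        simp only [List.sum_cons]
        omega

-- ===== VERDICT (by name: the statement is the Claim_ definition above) =====
theorem nonConstructibleChange1_spec : Claim_equal_nonConstructibleChange1 := by
  unfold Claim_equal_nonConstructibleChange1
  intro coins _
  unfold Spec_nonConstructibleChange1 nonConstructibleChange1 nonConstructibleChange1_alt
  set s := PySem.List.sorted coins (fun x => x) false with hs
  have hpw : s.Pairwise (· ≤ ·) := PySem.List.sorted_pairwise coins (fun x => x)
  obtain ⟨neg, p, hsplit, hneg, hpos⟩ := sorted_split s hpw
  have hppw : p.Pairwise (· ≤ ·) := by
    rw [hsplit] at hpw; exact (List.pairwise_append.mp hpw).2.1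
  obtain ⟨u, v, hp, hval, hcomp, hv⟩ := changeLoop_spec p 0 hpos hppw
  rw [zero_add] at hval
  have hvthr : ∀ x ∈ v, u.sum + 1 < x := by
    intro x hx; have := hv x hx; omega
  have hu_nn : ∀ x ∈ u, 0 ≤ x := fun x hx => hpos x (by rw [hp]; exact List.mem_append_left _ hx)
  have hv_nn : ∀ x ∈ v, 0 ≤ x := fun x hx => hpos x (by rw [hp]; exact List.mem_append_right _ hx)
  have husum : 0 ≤ u.sum := List.sum_nonneg hu_nn
  have hvsum : 0 ≤ v.sum := List.sum_nonneg hv_nn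
  have hB : pvChangeLoop s 0 = u.sum + 1 := by
    rw [hsplit, changeLoop_skip neg p 0 hneg, hval]
  have hrev : s.reverse = (v.reverse ++ u.reverse) ++ neg.reverse := by
    rw [hsplit, hp]; simp [List.reverse_append]
  have hred : ∀ k, 0 ≤ k → k ≤ u.sum + 1 →
      (0 < pvGreedy s.reverse k ↔ 0 < pvGreedy u.reverse k) := by
    intro k hk0 hkB
    rw [hrev, greedy_append_neg (v.reverse ++ u.reverse) neg.reverse k
      (by intro x hx
          rcases List.mem_append.mp hx with h | h
          · exact hv_nn x (List.mem_reverse.mp h)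
          · exact hu_nn x (List.mem_reverse.mp h))
      (fun x hx => hneg x (List.mem_reverse.mp hx)) hk0]
    rw [greedy_skip v.reverse u.reverse k hk0
      (by intro x hx; have := hvthr x (List.mem_reverse.mp hx); omega)]
  have hsucc : ∀ k, 1 ≤ k → k < u.sum + 1 → ¬ (0 < pvGreedy s.reverse k) := by
    intro k h1 h2
    rw [hred k (by omega) (by omega),
      greedy_success u k hcomp hu_nn (by omega) (by omega)]
    omega
  have hfail : 0 < pvGreedy s.reverse (u.sum + 1) := by
    rw [hred (u.sum + 1) (by omega) le_rfl]
    exact greedy_fail u hu_nn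
  rw [hB]
  have hpsum : p.sum = u.sum + v.sum := by rw [hp, List.sum_append]
  have hkey : u.sum ≤ (coins.map (fun c => max c 0)).sum := by
    have h1 : (s.map (fun c => max c 0)).sum = (coins.map (fun c => max c 0)).sum :=
      ((PySem.List.sorted_perm coins (fun x => x) false).map _).sum_eq
    have h2 : s.map (fun c => max c 0) = neg.map (fun c => max c 0) ++ p.map (fun c => max c 0) := by
      rw [hsplit, List.map_append]
    have h3 : p.map (fun c => max c 0) = p := by
      have := List.map_congr_left (l := p) (f := fun c => max c 0) (g := fun c => c)
        (fun x hx => max_eq_left (hpos x hx))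
      simpa using this
    have h4 : 0 ≤ (neg.map (fun c => max c 0)).sum := by
      apply List.sum_nonneg
      intro x hx
      obtain ⟨y, _, rfl⟩ := List.mem_map.mp hx
      exact le_max_right y 0
    have h5 : (s.map (fun c => max c 0)).sum = (neg.map (fun c => max c 0)).sum + p.sum := by
      rw [h2, List.sum_append, h3]
    omega
  exact amountLoop_eq s.reverse (u.sum + 1) hsucc hfail _ 1 le_rfl (by omega) (by omega)
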